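-- pv_equiv track=rewrite | github.com/cirosantilli/project-euler-solvers | solvers/487.py | prefix_power_sums_for_fk_and_fk1
-- ===== SOURCE A (Python) =====
-- def prefix_power_sums_for_fk_and_fk1(
--     k: int, d1: int, d2: int, p: int
-- ) -> tuple[list[int], list[int]]:
--     """
--     Build:
--       yk[i]  = f_k(i)     for i=0..d1
--       yk1[i] = f_{k+1}(i) for i=0..d2
--
--     Computed in one pass up to d2 using one pow() per i.
--     """
--     yk = [0] * (d1 + 1)
--     yk1 = [0] * (d2 + 1)
--     s0 = 0
--     s1 = 0
--     for i in range(1, d2 + 1):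
--         pk = pow(i, k, p)  # i^k mod p
--         s0 = (s0 + pk) % p
--         if i <= d1:
--             yk[i] = s0  # f_k(i)
--         s1 = (s1 + (pk * i) % p) % p  # add i^(k+1)
--         yk1[i] = s1  # f_{k+1}(i)
--     return yk, yk1
-- ===== SOURCE B (Python) =====
-- def prefix_power_sums_for_fk_and_fk1(
--     k: int, d1: int, d2: int, p: int
-- ) -> tuple[list[int], list[int]]:
--     """
--     Same results as the one-pow-per-i version, but i^k mod p is built by a
--     smallest-prime-factor sieve: pow() is called only at primes, composites
--     use complete multiplicativity i^k = spf^k * (i/spf)^k.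
--     """
--     yk = [0] * (d1 + 1)
--     yk1 = [0] * (d2 + 1)
--     n = d2
--     if n >= 1:
--         spf = [0] * (n + 1)
--         for i in range(2, n + 1):
--             if spf[i] == 0:
--                 for j in range(i, n + 1, i):
--                     if spf[j] == 0:
--                         spf[j] = i
--         pk = [0] * (n + 1)
--         pk[1] = 1 % p
--         for i in range(2, n + 1):
--             q = spf[i]
--             pk[i] = pow(i, k, p) if q == i else (pk[q] * pk[i // q]) % p
--         s0 = 0
--         s1 = 0
--         for i in range(1, n + 1):
--             s0 = (s0 + pk[i]) % p
--             if i <= d1: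
--                 yk[i] = s0
--             s1 = (s1 + pk[i] * i) % p
--             yk1[i] = s1
--     return yk, yk1
-- ===== Notes on version B (the rewrite author's own statement) =====
-- stated objective: faster
-- what changed: Instead of calling pow(i, k, p) for every i up to d2, B runs a smallest-prime-factor sieve and exploits complete multiplicativity (i^k = spf^k * (i/spf)^k mod p), so pow() is called only at primes and each composite costs one multiplication.
-- outside the precondition, e.g. on prefix_power_sums_for_fk_and_fk1(-1, 1, 1, 3): A returns ([0, 1], [0, 1]), B returns ([0, 1], [0, 1])
import Mathlib
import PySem

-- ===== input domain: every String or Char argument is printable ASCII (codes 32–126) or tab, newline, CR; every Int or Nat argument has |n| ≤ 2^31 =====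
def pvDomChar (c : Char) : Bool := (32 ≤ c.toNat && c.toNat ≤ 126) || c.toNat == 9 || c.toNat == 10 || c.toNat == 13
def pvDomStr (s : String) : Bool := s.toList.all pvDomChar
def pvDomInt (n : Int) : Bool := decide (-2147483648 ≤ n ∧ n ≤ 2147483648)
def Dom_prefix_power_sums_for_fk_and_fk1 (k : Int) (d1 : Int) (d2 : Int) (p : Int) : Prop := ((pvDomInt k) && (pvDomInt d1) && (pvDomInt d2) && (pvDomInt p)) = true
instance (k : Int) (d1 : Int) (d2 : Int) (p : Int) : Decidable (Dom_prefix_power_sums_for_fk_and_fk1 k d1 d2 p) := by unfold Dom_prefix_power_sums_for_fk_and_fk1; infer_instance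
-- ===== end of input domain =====

-- B replaces A's per-index pow(i, k, p) with a smallest-prime-factor sieve, calling pow only at
-- primes and computing composites by one modular multiplication (objective: faster).

-- ===== PORT A =====
def prefix_power_sums_for_fk_and_fk1 (k : Int) (d1 : Int) (d2 : Int) (p : Int) : List Int × List Int :=
  let yk : List Int := List.replicate (d1 + 1).toNat 0
  let yk1 : List Int := List.replicate (d2 + 1).toNat 0
  let st := (PySem.List.pyRange 1 (d2 + 1) 1).foldl
    (fun (st : List Int × List Int × Int × Int) i =>
      let pk := PySem.Int.powMod i k.toNat p
      let s0 := PySem.Int.mod (st.2.2.1 + pk) p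
      let yk := if i ≤ d1 then PySem.List.pySetD st.1 i s0 else st.1
      let s1 := PySem.Int.mod (st.2.2.2 + PySem.Int.mod (pk * i) p) p
      let yk1 := PySem.List.pySetD st.2.1 i s1
      (yk, yk1, s0, s1))
    (yk, yk1, 0, 0)
  (st.1, st.2.1)

-- ===== PORT B =====
def prefix_power_sums_for_fk_and_fk1_alt (k : Int) (d1 : Int) (d2 : Int) (p : Int) : List Int × List Int :=
  let yk : List Int := List.replicate (d1 + 1).toNat 0
  let yk1 : List Int := List.replicate (d2 + 1).toNat 0
  let n := d2
  if 1 ≤ n then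
    let spf := (PySem.List.pyRange 2 (n + 1) 1).foldl
      (fun (spf : List Int) i =>
        if PySem.List.pyGetD spf i 0 = 0 then
          (PySem.List.pyRange i (n + 1) i).foldl
            (fun spf j => if PySem.List.pyGetD spf j 0 = 0 then PySem.List.pySetD spf j i else spf)
            spf
        else spf)
      (List.replicate (n + 1).toNat 0)
    let pk := (PySem.List.pyRange 2 (n + 1) 1).foldl
      (fun (pk : List Int) i =>
        let q := PySem.List.pyGetD spf i 0
        PySem.List.pySetD pk i
          (if q = i then PySem.Int.powMod i k.toNat p
           else PySem.Int.mod
             (PySem.List.pyGetD pk q 0 * PySem.List.pyGetD pk (PySem.Int.floordiv i q) 0) p))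
      (PySem.List.pySetD (List.replicate (n + 1).toNat 0) 1 (PySem.Int.mod 1 p))
    let st := (PySem.List.pyRange 1 (n + 1) 1).foldl
      (fun (st : List Int × List Int × Int × Int) i =>
        let s0 := PySem.Int.mod (st.2.2.1 + PySem.List.pyGetD pk i 0) p
        let yk := if i ≤ d1 then PySem.List.pySetD st.1 i s0 else st.1
        let s1 := PySem.Int.mod (st.2.2.2 + PySem.List.pyGetD pk i 0 * i) p
        let yk1 := PySem.List.pySetD st.2.1 i s1
        (yk, yk1, s0, s1))
      (yk, yk1, 0, 0)
    (st.1, st.2.1)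
  else (yk, yk1)

-- ===== PRECONDITION & SPEC =====
-- Pre_ excludes p = 0 (Python pow/% raise ZeroDivisionError when the loop runs) and negative k
-- with the loop running (pow with a negative exponent raises ValueError whenever some i ≤ d2 is
-- not invertible mod p; on the remaining coprime cases A does return and B returns the same
-- value, but they lie outside the claim).
def Pre_prefix_power_sums_for_fk_and_fk1 (k : Int) (d1 : Int) (d2 : Int) (p : Int) : Prop :=
  d2 ≤ 0 ∨ (0 ≤ k ∧ p ≠ 0)
instance (k : Int) (d1 : Int) (d2 : Int) (p : Int) : Decidable (Pre_prefix_power_sums_for_fk_and_fk1 k d1 d2 p) := by unfold Pre_prefix_power_sums_for_fk_and_fk1; infer_instance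

def pvWitness_prefix_power_sums_for_fk_and_fk1 : Int × Int × Int × Int := (3, 2, 4, 7)

def Spec_prefix_power_sums_for_fk_and_fk1 (k : Int) (d1 : Int) (d2 : Int) (p : Int) (out : List Int × List Int) : Prop := out = prefix_power_sums_for_fk_and_fk1_alt k d1 d2 p
instance (k : Int) (d1 : Int) (d2 : Int) (p : Int) (out : List Int × List Int) : Decidable (Spec_prefix_power_sums_for_fk_and_fk1 k d1 d2 p out) := by unfold Spec_prefix_power_sums_for_fk_and_fk1; infer_instance

-- ===== CLAIM (what is proved, stated in full; the proofs are below) =====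
def Claim_equal_prefix_power_sums_for_fk_and_fk1 : Prop := ∀ (k : Int) (d1 : Int) (d2 : Int) (p : Int), Dom_prefix_power_sums_for_fk_and_fk1 k d1 d2 p → Pre_prefix_power_sums_for_fk_and_fk1 k d1 d2 p → Spec_prefix_power_sums_for_fk_and_fk1 k d1 d2 p (prefix_power_sums_for_fk_and_fk1 k d1 d2 p)

-- ===== LEMMAS AND PROOFS =====

-- Python % is a congruence: values congruent mod p have the same fmod.
lemma pv_mod_cong {p x y : Int} (h : p ∣ x - y) : PySem.Int.mod x p = PySem.Int.mod y p := by
  obtain ⟨c, hc⟩ := h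
  have hx : x = y + p * c := by linarith
  simp [PySem.Int.mod, hx, Int.add_mul_fmod_self_left]

lemma pv_mod_sub_dvd (p x : Int) : p ∣ x - PySem.Int.mod x p :=
  Int.dvd_self_sub_of_fmod_eq rfl

lemma pv_mod_absorb (p s x : Int) :
    PySem.Int.mod (s + PySem.Int.mod x p) p = PySem.Int.mod (s + x) p := by
  apply pv_mod_cong
  have h := pv_mod_sub_dvd p x
  have he : (s + PySem.Int.mod x p) - (s + x) = -(x - PySem.Int.mod x p) := by ring
  rw [he]; exact dvd_neg.mpr h

lemma pv_mod_mul (p a b : Int) :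
    PySem.Int.mod (PySem.Int.mod a p * PySem.Int.mod b p) p = PySem.Int.mod (a * b) p := by
  apply pv_mod_cong
  have ha := pv_mod_sub_dvd p a
  have hb := pv_mod_sub_dvd p b
  have he : PySem.Int.mod a p * PySem.Int.mod b p - a * b
      = -((a - PySem.Int.mod a p) * PySem.Int.mod b p) + -(a * (b - PySem.Int.mod b p)) := by ring
  rw [he]
  exact dvd_add (dvd_neg.mpr (ha.mul_right _)) (dvd_neg.mpr (hb.mul_left _))

lemma pv_getD_replicate (N : Nat) (j : Int) :
    PySem.List.pyGetD (List.replicate N (0:Int)) j 0 = 0 := by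
  simp only [PySem.List.pyGetD, PySem.List.pyGet?, PySem.List.pyIdx?]
  split_ifs <;> simp [List.getElem?_replicate] <;> split_ifs <;> simp

lemma pv_getD_setD (xs : List Int) (a b v : Int) (ha : 0 ≤ a) (hb : 0 ≤ b)
    (hal : a < (xs.length : Int)) :
    PySem.List.pyGetD (PySem.List.pySetD xs a v) b 0
      = if b = a then v else PySem.List.pyGetD xs b 0 := by
  have ha' : a = ((a.toNat : Nat) : Int) := (Int.toNat_of_nonneg ha).symm
  have hb' : b = ((b.toNat : Nat) : Int) := (Int.toNat_of_nonneg hb).symm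
  rw [ha', hb', PySem.List.pyGetD_pySetD_natCast xs a.toNat b.toNat v 0 (by omega)]
  norm_cast

-- the inner sieve loop: a position keeps its nonzero value; zero positions listed in l become i
lemma pv_inner (i : Int) (hi : 0 < i) :
    ∀ (l : List Int) (spf : List Int), (∀ e ∈ l, 0 ≤ e ∧ e < (spf.length : Int)) →
      (l.foldl (fun spf j => if PySem.List.pyGetD spf j 0 = 0 then PySem.List.pySetD spf j i else spf) spf).length = spf.length ∧
      ∀ b : Int, 0 ≤ b →
        PySem.List.pyGetD (l.foldl (fun spf j => if PySem.List.pyGetD spf j 0 = 0 then PySem.List.pySetD spf j i else spf) spf) b 0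
        = if PySem.List.pyGetD spf b 0 = 0 ∧ b ∈ l then i else PySem.List.pyGetD spf b 0 := by
  intro l
  induction l with
  | nil =>
    intro spf _
    exact ⟨rfl, fun b _ => by simp⟩
  | cons e t ih =>
    intro spf h
    have he0 : 0 ≤ e := (h e (by simp)).1
    have hel : e < (spf.length : Int) := (h e (by simp)).2
    by_cases hz : PySem.List.pyGetD spf e 0 = 0
    · have hstep : (e :: t).foldl (fun spf j => if PySem.List.pyGetD spf j 0 = 0 then PySem.List.pySetD spf j i else spf) spf
          = t.foldl (fun spf j => if PySem.List.pyGetD spf j 0 = 0 then PySem.List.pySetD spf j i else spf) (PySem.List.pySetD spf e i) := by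
        simp [hz]
      have hlen' : (PySem.List.pySetD spf e i).length = spf.length := PySem.List.length_pySetD ..
      have hfold := ih (PySem.List.pySetD spf e i)
        (fun e' he' => by rw [hlen']; exact h e' (by simp [he']))
      rw [hstep]
      refine ⟨by rw [hfold.1, hlen'], ?_⟩
      intro b hb
      rw [hfold.2 b hb, pv_getD_setD spf e b i he0 hb hel]
      by_cases hbe : b = e
      · subst hbe
        have hine : ¬ (i = 0) := by omega
        simp [hine, hz]
      · simp only [if_neg hbe]
        by_cases hbz : PySem.List.pyGetD spf b 0 = 0
        · simp [hbz, hbe]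
        · simp [hbz]
    · have hstep : (e :: t).foldl (fun spf j => if PySem.List.pyGetD spf j 0 = 0 then PySem.List.pySetD spf j i else spf) spf
          = t.foldl (fun spf j => if PySem.List.pyGetD spf j 0 = 0 then PySem.List.pySetD spf j i else spf) spf := by
        simp [hz]
      rw [hstep]
      have hfold := ih spf (fun e' he' => h e' (by simp [he']))
      refine ⟨hfold.1, ?_⟩
      intro b hb
      rw [hfold.2 b hb]
      by_cases hbe : b = e
      · subst hbe
        simp [hz]
      · simp [hbe]

-- the outer sieve loop: afterwards every 2 ≤ j ≤ n holds a smallest-prime-factor-style entry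
-- (nonzero, between 2 and j, dividing j)
lemma pv_outer (n : Int) (hn : 1 ≤ n) :
    ∀ (c : Nat) (a : Int), 2 ≤ a → (n + 1 - a).toNat = c →
    ∀ spf : List Int,
      spf.length = (n + 1).toNat →
      (∀ j : Int, 2 ≤ j → j ≤ n → PySem.List.pyGetD spf j 0 ≠ 0 →
        2 ≤ PySem.List.pyGetD spf j 0 ∧ PySem.List.pyGetD spf j 0 ≤ j ∧ PySem.List.pyGetD spf j 0 ∣ j) →
      (∀ j : Int, 2 ≤ j → j < a → j ≤ n → PySem.List.pyGetD spf j 0 ≠ 0) →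
      ((PySem.List.pyRange a (n + 1) 1).foldl
        (fun spf i =>
          if PySem.List.pyGetD spf i 0 = 0 then
            (PySem.List.pyRange i (n + 1) i).foldl
              (fun spf j => if PySem.List.pyGetD spf j 0 = 0 then PySem.List.pySetD spf j i else spf)
              spf
          else spf) spf).length = (n + 1).toNat ∧
      (∀ j : Int, 2 ≤ j → j ≤ n →
        PySem.List.pyGetD ((PySem.List.pyRange a (n + 1) 1).foldl
          (fun spf i =>
            if PySem.List.pyGetD spf i 0 = 0 then
              (PySem.List.pyRange i (n + 1) i).foldl
                (fun spf j => if PySem.List.pyGetD spf j 0 = 0 then PySem.List.pySetD spf j i else spf)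
                spf
            else spf) spf) j 0 ≠ 0 ∧
        2 ≤ PySem.List.pyGetD ((PySem.List.pyRange a (n + 1) 1).foldl
          (fun spf i =>
            if PySem.List.pyGetD spf i 0 = 0 then
              (PySem.List.pyRange i (n + 1) i).foldl
                (fun spf j => if PySem.List.pyGetD spf j 0 = 0 then PySem.List.pySetD spf j i else spf)
                spf
            else spf) spf) j 0 ∧
        PySem.List.pyGetD ((PySem.List.pyRange a (n + 1) 1).foldl
          (fun spf i =>
            if PySem.List.pyGetD spf i 0 = 0 then
              (PySem.List.pyRange i (n + 1) i).foldl
                (fun spf j => if PySem.List.pyGetD spf j 0 = 0 then PySem.List.pySetD spf j i else spf)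
                spf
            else spf) spf) j 0 ≤ j ∧
        PySem.List.pyGetD ((PySem.List.pyRange a (n + 1) 1).foldl
          (fun spf i =>
            if PySem.List.pyGetD spf i 0 = 0 then
              (PySem.List.pyRange i (n + 1) i).foldl
                (fun spf j => if PySem.List.pyGetD spf j 0 = 0 then PySem.List.pySetD spf j i else spf)
                spf
            else spf) spf) j 0 ∣ j) := by
  intro c
  induction c with
  | zero =>
    intro a ha hc spf hlen hwf hcov
    have hge : n + 1 ≤ a := by omega
    rw [PySem.List.pyRange_one_eq_nil hge]
    refine ⟨hlen, ?_⟩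
    intro j hj2 hjn
    have hnz := hcov j hj2 (by omega) hjn
    simp only [List.foldl_nil]
    exact ⟨hnz, hwf j hj2 hjn hnz⟩
  | succ c ih =>
    intro a ha hc spf hlen hwf hcov
    have hlt : a < n + 1 := by omega
    rw [PySem.List.pyRange_one_cons hlt, List.foldl_cons]
    by_cases hz : PySem.List.pyGetD spf a 0 = 0
    · simp only [if_pos hz]
      have hinner := pv_inner a (by omega) (PySem.List.pyRange a (n + 1) a) spf
        (fun e he => by
          rw [PySem.List.mem_pyRange_iff_of_pos (by omega)] at he
          refine ⟨by omega, ?_⟩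
          rw [hlen]
          omega)
      obtain ⟨hilen, higet⟩ := hinner
      apply ih (a + 1) (by omega) (by omega)
      · rw [hilen, hlen]
      · intro j hj2 hjn hnz
        rw [higet j (by omega)] at hnz ⊢
        by_cases hcond : PySem.List.pyGetD spf j 0 = 0 ∧ j ∈ PySem.List.pyRange a (n + 1) a
        · rw [if_pos hcond]
          have hmem := hcond.2
          rw [PySem.List.mem_pyRange_iff_of_pos (by omega)] at hmem
          refine ⟨ha, hmem.1, ?_⟩
          have h1 : a ∣ j - a := hmem.2.2
          simpa using dvd_add h1 (dvd_refl a)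
        · rw [if_neg hcond] at hnz ⊢
          exact hwf j hj2 hjn hnz
      · intro j hj2 hja hjn
        rw [higet j (by omega)]
        by_cases hje : j = a
        · subst hje
          have hmem : j ∈ PySem.List.pyRange j (n + 1) j := by
            rw [PySem.List.mem_pyRange_iff_of_pos (by omega)]
            refine ⟨le_refl _, by omega, by simp⟩
          rw [if_pos ⟨hz, hmem⟩]
          omega
        · have hja' : j < a := by omega
          have hnz := hcov j hj2 hja' hjn
          by_cases hcond : PySem.List.pyGetD spf j 0 = 0 ∧ j ∈ PySem.List.pyRange a (n + 1) a
          · rw [if_pos hcond]; omega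
          · rw [if_neg hcond]; exact hnz
    · simp only [if_neg hz]
      apply ih (a + 1) (by omega) (by omega) spf hlen hwf
      intro j hj2 hja hjn
      by_cases hje : j = a
      · subst hje; exact hz
      · exact hcov j hj2 (by omega) hjn

-- the pk loop: pk[j] = j^k mod p for all already-processed indices
lemma pv_pk (n p k : Int) (hn : 1 ≤ n) (spf : List Int)
    (hwf : ∀ j : Int, 2 ≤ j → j ≤ n →
      PySem.List.pyGetD spf j 0 ≠ 0 ∧ 2 ≤ PySem.List.pyGetD spf j 0 ∧
      PySem.List.pyGetD spf j 0 ≤ j ∧ PySem.List.pyGetD spf j 0 ∣ j) :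
    ∀ (c : Nat) (m : Int), 2 ≤ m → m ≤ n + 1 → (m - 2).toNat = c →
      ((PySem.List.pyRange 2 m 1).foldl
        (fun pk i =>
          PySem.List.pySetD pk i
            (if PySem.List.pyGetD spf i 0 = i then PySem.Int.powMod i k.toNat p
             else PySem.Int.mod
               (PySem.List.pyGetD pk (PySem.List.pyGetD spf i 0) 0 *
                PySem.List.pyGetD pk (PySem.Int.floordiv i (PySem.List.pyGetD spf i 0)) 0) p))
        (PySem.List.pySetD (List.replicate (n + 1).toNat 0) 1 (PySem.Int.mod 1 p))).length = (n + 1).toNat ∧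
      ∀ j : Int, 1 ≤ j → j < m →
        PySem.List.pyGetD ((PySem.List.pyRange 2 m 1).foldl
          (fun pk i =>
            PySem.List.pySetD pk i
              (if PySem.List.pyGetD spf i 0 = i then PySem.Int.powMod i k.toNat p
               else PySem.Int.mod
                 (PySem.List.pyGetD pk (PySem.List.pyGetD spf i 0) 0 *
                  PySem.List.pyGetD pk (PySem.Int.floordiv i (PySem.List.pyGetD spf i 0)) 0) p))
          (PySem.List.pySetD (List.replicate (n + 1).toNat 0) 1 (PySem.Int.mod 1 p))) j 0
        = PySem.Int.mod (j ^ k.toNat) p := by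
  intro c
  induction c with
  | zero =>
    intro m hm2 hmn hc
    have hm : m = 2 := by omega
    subst hm
    rw [PySem.List.pyRange_one_eq_nil (le_refl 2)]
    have hlen0 : (PySem.List.pySetD (List.replicate (n + 1).toNat 0) 1 (PySem.Int.mod 1 p)).length = (n + 1).toNat := by
      rw [PySem.List.length_pySetD, List.length_replicate]
    refine ⟨hlen0, ?_⟩
    intro j hj1 hj2
    have hj : j = 1 := by omega
    subst hj
    simp only [List.foldl_nil]
    rw [pv_getD_setD (List.replicate (n + 1).toNat 0) 1 1 (PySem.Int.mod 1 p) (by omega) (by omega)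
      (by rw [List.length_replicate]; omega)]
    simp
  | succ c ih =>
    intro m hm2 hmn hc
    have hm3 : 3 ≤ m := by omega
    have hsplit : PySem.List.pyRange 2 m 1 = PySem.List.pyRange 2 (m - 1) 1 ++ [m - 1] := by
      have := PySem.List.pyRange_one_succ_right (a := 2) (b := m - 1) (by omega)
      rw [show m - 1 + 1 = m by ring] at this
      exact this
    rw [hsplit, List.foldl_append]
    obtain ⟨hplen, hpget⟩ := ih (m - 1) (by omega) (by omega) (by omega)
    simp only [List.foldl_cons, List.foldl_nil]
    set pkpre := (PySem.List.pyRange 2 (m - 1) 1).foldl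
      (fun pk i =>
        PySem.List.pySetD pk i
          (if PySem.List.pyGetD spf i 0 = i then PySem.Int.powMod i k.toNat p
           else PySem.Int.mod
             (PySem.List.pyGetD pk (PySem.List.pyGetD spf i 0) 0 *
              PySem.List.pyGetD pk (PySem.Int.floordiv i (PySem.List.pyGetD spf i 0)) 0) p))
      (PySem.List.pySetD (List.replicate (n + 1).toNat 0) 1 (PySem.Int.mod 1 p)) with hpk
    have hq := hwf (m - 1) (by omega) (by omega)
    set q := PySem.List.pyGetD spf (m - 1) 0 with hqdef
    have hval : (if q = m - 1 then PySem.Int.powMod (m - 1) k.toNat p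
         else PySem.Int.mod
           (PySem.List.pyGetD pkpre q 0 *
            PySem.List.pyGetD pkpre (PySem.Int.floordiv (m - 1) q) 0) p)
        = PySem.Int.mod ((m - 1) ^ k.toNat) p := by
      by_cases hqm : q = m - 1
      · rw [if_pos hqm]
        rfl
      · rw [if_neg hqm]
        have hq2 : 2 ≤ q := hq.2.1
        have hqle : q ≤ m - 1 := hq.2.2.1
        have hqdvd : q ∣ m - 1 := hq.2.2.2
        have hfd : PySem.Int.floordiv (m - 1) q = (m - 1) / q :=
          PySem.Int.floordiv_eq_ediv_of_pos (by omega)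
        have hqt : q * ((m - 1) / q) = m - 1 := Int.mul_ediv_cancel' hqdvd
        set t := (m - 1) / q with htdef
        have ht1 : 1 ≤ t := by nlinarith
        have htm : t < m - 1 := by nlinarith
        rw [hfd]
        rw [hpget q (by omega) (by omega), hpget t (by omega) (by omega)]
        rw [pv_mod_mul, ← mul_pow, hqt]
    rw [hval]
    have hlen' : (PySem.List.pySetD pkpre (m - 1) (PySem.Int.mod ((m - 1) ^ k.toNat) p)).length = (n + 1).toNat := by
      rw [PySem.List.length_pySetD, hplen]
    refine ⟨hlen', ?_⟩
    intro j hj1 hjm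
    rw [pv_getD_setD pkpre (m - 1) j _ (by omega) (by omega) (by rw [hplen]; omega)]
    by_cases hje : j = m - 1
    · rw [if_pos hje, hje]
    · rw [if_neg hje]
      exact hpget j hj1 (by omega)

lemma pv_third (k d1 d2 p : Int) (pkL : List Int)
    (hpk : ∀ j : Int, 1 ≤ j → j < d2 + 1 →
      PySem.List.pyGetD pkL j 0 = PySem.Int.mod (j ^ k.toNat) p)
    (st0 : List Int × List Int × Int × Int) :
    (PySem.List.pyRange 1 (d2 + 1) 1).foldl
      (fun (st : List Int × List Int × Int × Int) i =>
        (if i ≤ d1 then PySem.List.pySetD st.1 i (PySem.Int.mod (st.2.2.1 + PySem.Int.powMod i k.toNat p) p) else st.1,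
         PySem.List.pySetD st.2.1 i (PySem.Int.mod (st.2.2.2 + PySem.Int.mod (PySem.Int.powMod i k.toNat p * i) p) p),
         PySem.Int.mod (st.2.2.1 + PySem.Int.powMod i k.toNat p) p,
         PySem.Int.mod (st.2.2.2 + PySem.Int.mod (PySem.Int.powMod i k.toNat p * i) p) p)) st0
    = (PySem.List.pyRange 1 (d2 + 1) 1).foldl
      (fun (st : List Int × List Int × Int × Int) i =>
        (if i ≤ d1 then PySem.List.pySetD st.1 i (PySem.Int.mod (st.2.2.1 + PySem.List.pyGetD pkL i 0) p) else st.1,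
         PySem.List.pySetD st.2.1 i (PySem.Int.mod (st.2.2.2 + PySem.List.pyGetD pkL i 0 * i) p) ,
         PySem.Int.mod (st.2.2.1 + PySem.List.pyGetD pkL i 0) p,
         PySem.Int.mod (st.2.2.2 + PySem.List.pyGetD pkL i 0 * i) p)) st0 := by
  apply PySem.List.foldl_congr_mem
  intro acc x hx
  rw [PySem.List.mem_pyRange_one] at hx
  simp only [hpk x hx.1 hx.2, PySem.Int.powMod, pv_mod_absorb]

theorem pv_main (k d1 d2 p : Int) :
    prefix_power_sums_for_fk_and_fk1 k d1 d2 p = prefix_power_sums_for_fk_and_fk1_alt k d1 d2 p := by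
  by_cases hd : 1 ≤ d2
  · simp only [prefix_power_sums_for_fk_and_fk1, prefix_power_sums_for_fk_and_fk1_alt, if_pos hd]
    have hspf := pv_outer d2 hd (d2 + 1 - 2).toNat 2 (le_refl 2) rfl
      (List.replicate (d2 + 1).toNat 0) (by simp)
      (fun j hj2 hjn hnz => absurd (pv_getD_replicate (d2 + 1).toNat j) hnz)
      (fun j hj2 hja hjn => by omega)
    have hpk := pv_pk d2 p k hd _ hspf.2 (d2 + 1 - 2).toNat (d2 + 1) (by omega) (le_refl _) rfl
    rw [pv_third k d1 d2 p _ (fun j hj1 hj2 => hpk.2 j hj1 hj2)]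
  · simp only [prefix_power_sums_for_fk_and_fk1, prefix_power_sums_for_fk_and_fk1_alt, if_neg hd,
      PySem.List.pyRange_one_eq_nil (show d2 + 1 ≤ 1 by omega), List.foldl_nil]

-- ===== VERDICT (by name: the statement is the Claim_ definition above) =====
theorem prefix_power_sums_for_fk_and_fk1_spec : Claim_equal_prefix_power_sums_for_fk_and_fk1 := by
  intro k d1 d2 p _ _
  unfold Spec_prefix_power_sums_for_fk_and_fk1
  exact pv_main k d1 d2 p
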